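-- pv_equiv track=rewrite | github.com/ViktorClaesson/advent-of-code-2020 | day14.py | addr_parse
-- ===== SOURCE A (Python) =====
-- def split_addr(addr, idx):
--     left = list(addr)
--     left[idx] = '0'
--     right = list(addr)
--     right[idx] = '1'
--     return left, right
--
-- def addr_parse(addr):
--     idx = 0
--     addrs = [list(addr)]
--     while idx < len(addr):
--         if addr[idx] == 'X':
--             addrs = [item for ls in [split_addr(
--                 addr, idx) for addr in addrs] for item in ls]
--         idx += 1
--
--     return [''.join(addr) for addr in addrs]
-- ===== SOURCE B (Python) =====
-- def addr_parse(addr):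
--     xs = [i for i in range(len(addr)) if addr[i] == 'X']
--
--     def go(a, positions):
--         if not positions:
--             return [''.join(a)]
--         i, rest = positions[0], positions[1:]
--         lo = a.copy()
--         lo[i] = '0'
--         hi = a.copy()
--         hi[i] = '1'
--         return go(lo, rest) + go(hi, rest)
--
--     return go(list(addr), xs)
-- ===== Notes on version B (the rewrite author's own statement) =====
-- stated objective: alternative
-- what changed: B collects the wildcard positions in one scan and then recurses over that position list, splitting depth-first into the zero and one branches and joining at the leaves, instead of A's breadth-wise doubling of a list of full address copies at every wildcard while rescanning the whole string.
import Mathlib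
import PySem

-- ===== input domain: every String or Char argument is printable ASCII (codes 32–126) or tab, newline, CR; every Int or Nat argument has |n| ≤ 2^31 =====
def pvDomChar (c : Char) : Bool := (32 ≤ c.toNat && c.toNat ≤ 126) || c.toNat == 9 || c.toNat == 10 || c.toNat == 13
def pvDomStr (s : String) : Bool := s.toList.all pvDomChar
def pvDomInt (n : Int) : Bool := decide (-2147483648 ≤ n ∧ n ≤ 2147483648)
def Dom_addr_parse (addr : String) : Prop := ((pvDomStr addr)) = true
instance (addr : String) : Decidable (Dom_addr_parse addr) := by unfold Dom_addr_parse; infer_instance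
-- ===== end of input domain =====

-- B collects the X-positions once and recurses over them depth-first; A doubles a list of
-- address copies at each X while scanning the string; same output, no speed claim.

-- ===== PORT A =====
-- left = list(addr); left[idx] = '0'; right = list(addr); right[idx] = '1'  (copy + assign = List.set)
def split_addr (a : List Char) (idx : Nat) : List Char × List Char :=
  (a.set idx '0', a.set idx '1')

-- the while loop of A: idx counts up from 0 to len(addr); addr[idx] is always in range here
def addrParseLoop (l : List Char) (idx : Nat) (addrs : List (List Char)) : List (List Char) :=
  if h : idx < l.length then
    addrParseLoop l (idx + 1)
      (if l[idx] = 'X' then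
        (addrs.map (fun a => split_addr a idx)).flatMap (fun p => [p.1, p.2])
      else addrs)
  else addrs
termination_by l.length - idx

def addr_parse (addr : String) : List String :=
  (addrParseLoop addr.toList 0 [addr.toList]).map (fun a => String.mk a)

-- ===== PORT B =====
-- go(a, positions): depth-first split at the first remaining X-position (copy + assign = List.set)
def altGo (a : List Char) (ps : List Nat) : List String :=
  match ps with
  | [] => [String.mk a]
  | i :: rest => altGo (a.set i '0') rest ++ altGo (a.set i '1') rest

-- xs = [i for i in range(len(addr)) if addr[i] == 'X']  (indices 0..len-1 are in range, hence Nat; getD never hits its default)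
def addr_parse_alt (addr : String) : List String :=
  altGo addr.toList
    ((List.range addr.toList.length).filter (fun i => addr.toList.getD i ' ' = 'X'))

-- ===== PRECONDITION & SPEC =====
def Spec_addr_parse (addr : String) (out : List String) : Prop := out = addr_parse_alt addr
instance (addr : String) (out : List String) : Decidable (Spec_addr_parse addr out) := by unfold Spec_addr_parse; infer_instance

-- ===== CLAIM (what is proved, stated in full; the proofs are below) =====
def Claim_equal_addr_parse : Prop := ∀ (addr : String), Dom_addr_parse addr → Spec_addr_parse addr (addr_parse addr)

-- ===== LEMMAS AND PROOFS =====

theorem flatMap_single {α β : Type} (f : α → β) (l : List α) :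
    l.flatMap (fun a => [f a]) = l.map f := by
  induction l <;> simp_all

theorem altGo_flatMap_set (addrs : List (List Char)) (i : Nat) (rest : List Nat) :
    ((addrs.map (fun a => split_addr a i)).flatMap (fun p => [p.1, p.2])).flatMap
        (fun a => altGo a rest)
      = addrs.flatMap (fun a => altGo a (i :: rest)) := by
  induction addrs with
  | nil => rfl
  | cons a tl ih =>
    simp only [split_addr, altGo] at ih
    simp only [List.map_cons, List.flatMap_cons, List.flatMap_append, split_addr, altGo, ih]
    simp [List.append_assoc]

theorem addrParseLoop_eq (l : List Char) (n idx : Nat) (addrs : List (List Char))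
    (hn : l.length - idx ≤ n) :
    (addrParseLoop l idx addrs).map (fun a => String.mk a)
      = addrs.flatMap (fun a =>
          altGo a ((List.range' idx (l.length - idx)).filter (fun i => l.getD i ' ' = 'X'))) := by
  induction n generalizing idx addrs with
  | zero =>
    have h : ¬ idx < l.length := by omega
    rw [addrParseLoop]
    simp [h, Nat.sub_eq_zero_of_le (by omega : l.length ≤ idx), altGo, flatMap_single]
  | succ n ih =>
    by_cases h : idx < l.length
    · rw [addrParseLoop]
      simp only [h, dif_pos]
      have hlen : l.length - idx = (l.length - (idx + 1)) + 1 := by omega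
      rw [hlen, List.range'_succ, List.filter_cons]
      have hgd : l.getD idx ' ' = l[idx] := List.getD_eq_getElem l ' ' h
      by_cases hx : l[idx] = 'X'
      · simp only [hx, if_pos, hgd, decide_true]
        rw [ih (idx + 1) _ (by omega), altGo_flatMap_set]
      · simp only [hx, hgd, decide_false]
        simpa using ih (idx + 1) addrs (by omega)
    · rw [addrParseLoop]
      simp [h, Nat.sub_eq_zero_of_le (by omega : l.length ≤ idx), altGo, flatMap_single]

-- ===== VERDICT (by name: the statement is the Claim_ definition above) =====
theorem addr_parse_spec : Claim_equal_addr_parse := by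
  intro addr _
  unfold Spec_addr_parse addr_parse addr_parse_alt
  rw [addrParseLoop_eq addr.toList addr.toList.length 0 [addr.toList] (by omega)]
  simp [List.range_eq_range']
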